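-- pv_equiv track=rewrite | github.com/mrzmyr/hrw-sound-classification | utils.py | get_peaks_max
-- ===== SOURCE A (Python) =====
-- def get_peaks_max(x, y, threshold):
--   peaks_x = []
--   peaks_y = []
--   start = None
--   end = None
--
--   for b in range(len(y)):
--     if y[b] > threshold and start is None:
--       start = b
--     if y[b] < threshold and start is not None:
--       end = b
--     if start is not None and end is not None:
--       delta = end - start
--       peaks_x.append(x[end - int(delta / 2)])
--       peaks_y.append(max(y[start:end]))
--       start = None
--       end = None
--
--   return peaks_x, peaks_y
-- ===== SOURCE B (Python) =====
-- def get_peaks_max(x, y, threshold):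
--     # Single pass with an inner "consume the region" loop and a running max:
--     # no Optional state flags, no slicing, no second scan per region.
--     peaks_x = []
--     peaks_y = []
--     n = len(y)
--     i = 0
--     while i < n:
--         if y[i] > threshold:
--             s = i
--             m = y[i]
--             i += 1
--             while i < n and y[i] >= threshold:
--                 if y[i] > m:
--                     m = y[i]
--                 i += 1
--             if i < n:  # region closed at i (y[i] < threshold)
--                 peaks_x.append(x[(s + i + 1) // 2])
--                 peaks_y.append(m)
--             # an unclosed trailing region is dropped (i == n ends the loop)
--         else:
--             i += 1
--     return peaks_x, peaks_y
-- ===== Notes on version B (the rewrite author's own statement) =====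
-- stated objective: alternative
-- what changed: Replaces A's flag-state machine (start/end Optionals checked every iteration, max re-scanned over a slice per peak) by a single scan with an inner region-consuming loop that carries a running max and appends the midpoint x via (s+e+1)//2 when the region closes; no Optional state, no slicing, no second scan per region.
import Mathlib
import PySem

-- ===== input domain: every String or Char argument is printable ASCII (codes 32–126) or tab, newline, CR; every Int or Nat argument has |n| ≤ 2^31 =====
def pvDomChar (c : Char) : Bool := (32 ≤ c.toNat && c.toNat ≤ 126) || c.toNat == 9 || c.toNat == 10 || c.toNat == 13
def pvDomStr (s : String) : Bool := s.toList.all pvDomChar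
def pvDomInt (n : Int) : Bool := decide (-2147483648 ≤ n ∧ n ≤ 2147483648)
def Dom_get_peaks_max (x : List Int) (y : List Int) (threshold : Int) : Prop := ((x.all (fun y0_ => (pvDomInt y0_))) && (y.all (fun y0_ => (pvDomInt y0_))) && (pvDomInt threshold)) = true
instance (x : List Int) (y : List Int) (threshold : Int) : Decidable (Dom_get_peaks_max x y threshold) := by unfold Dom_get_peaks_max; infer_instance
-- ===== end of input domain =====

-- B replaces A's flag-state machine (start/end Optionals, max over a slice per peak) by a
-- single scan with an inner region-consuming loop carrying a running max (objective: alternative).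

-- ===== PORT A =====
-- max(y[s:e]) on a nonempty slice (A calls it only with s < e ≤ len y); getD 0 is unreachable there
def pvMaxSlice (y : List Int) (s e : Nat) : Int :=
  (PySem.List.max? (PySem.List.slice y (some (s : Int)) (some (e : Int))) (fun v => v)).getD 0

-- the 'for b in range(len(y))' loop, as structural recursion on the remaining suffix of y;
-- x[i] is ported as x.getD i 0 (in range under Pre_, where Python does not raise)
def get_peaks_max_loop (x y : List Int) (threshold : Int) :
    List Int → Nat → List Int → List Int → Option Nat → Option Nat → List Int × List Int
  | [], _, px, py, _, _ => (px, py)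
  | v :: rest, b, px, py, s0, e0 =>
    let s1 := if v > threshold ∧ s0 = none then some b else s0
    let e1 := if v < threshold ∧ s1 ≠ none then some b else e0
    match s1, e1 with
    | some sv, some ev =>
        get_peaks_max_loop x y threshold rest (b + 1)
          (px ++ [x.getD (ev - (ev - sv) / 2) 0]) (py ++ [pvMaxSlice y sv ev]) none none
    | _, _ => get_peaks_max_loop x y threshold rest (b + 1) px py s1 e1

def get_peaks_max (x : List Int) (y : List Int) (threshold : Int) : List Int × List Int :=
  get_peaks_max_loop x y threshold y 0 [] [] none none

-- ===== PORT B =====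
-- the inner 'while i < n and y[i] >= threshold' loop with its running max, walking the
-- suffix y[i:] of y; returns (exit index, running max)
def pv_consume (t : Int) : List Int → Nat → Int → Nat × Int
  | [], i, m => (i, m)
  | v :: rest, i, m =>
      if v ≥ t then pv_consume t rest (i + 1) (if v > m then v else m) else (i, m)

lemma pv_consume_ge (t : Int) :
    ∀ (l : List Int) (i : Nat) (m : Int), i ≤ (pv_consume t l i m).1 := by
  intro l
  induction l with
  | nil => intro i m; simp [pv_consume]
  | cons v rest ih =>
    intro i m
    by_cases h : v ≥ t
    · simp only [pv_consume, if_pos h]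
      have := ih (i + 1) (if v > m then v else m)
      omega
    · simp [pv_consume, if_neg h]

-- the outer 'while i < n' loop
def pv_outer (x y : List Int) (t : Int) (n : Nat) (i : Nat) (px py : List Int) :
    List Int × List Int :=
  if _h : i < n then
    if y.getD i 0 > t then
      let r := pv_consume t (y.drop (i + 1)) (i + 1) (y.getD i 0)
      if r.1 < n then
        pv_outer x y t n r.1 (px ++ [x.getD ((i + r.1 + 1) / 2) 0]) (py ++ [r.2])
      else (px, py)
    else pv_outer x y t n (i + 1) px py
  else (px, py)
termination_by n - i
decreasing_by
  · have := pv_consume_ge t (y.drop (i + 1)) (i + 1) (y.getD i 0); omega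
  · omega

def get_peaks_max_alt (x : List Int) (y : List Int) (threshold : Int) : List Int × List Int :=
  pv_outer x y threshold y.length 0 [] []

-- ===== PRECONDITION & SPEC =====
-- (s, e) is exactly an interval A records: it opens at s (first value above threshold since the
-- previous close) and closes at e (first later value below threshold).
def pvRecorded (y : List Int) (t : Int) (s e : Nat) : Bool :=
  decide (s < e) && decide (e < y.length) && decide (y.getD s 0 > t) && decide (y.getD e 0 < t) &&
  ((List.range e).all fun k => decide (k ≤ s) || decide (y.getD k 0 ≥ t)) &&
  ((List.range s).all fun j =>
    decide (y.getD j 0 ≤ t) || ((List.range s).any fun m => decide (j < m) && decide (y.getD m 0 < t)))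

-- Pre_ excludes exactly the inputs on which A raises IndexError: some recorded peak's
-- midpoint index reaches past the end of x.
def Pre_get_peaks_max (x : List Int) (y : List Int) (threshold : Int) : Prop :=
  ∀ e < y.length, ∀ s < e, pvRecorded y threshold s e = true → e - (e - s) / 2 < x.length
instance (x : List Int) (y : List Int) (threshold : Int) : Decidable (Pre_get_peaks_max x y threshold) := by
  unfold Pre_get_peaks_max; infer_instance

def pvWitness_get_peaks_max : List Int × List Int × Int := ([10, 20, 30], [0, 5, 0], 1)

def Spec_get_peaks_max (x : List Int) (y : List Int) (threshold : Int) (out : List Int × List Int) : Prop := out = get_peaks_max_alt x y threshold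
instance (x : List Int) (y : List Int) (threshold : Int) (out : List Int × List Int) : Decidable (Spec_get_peaks_max x y threshold out) := by unfold Spec_get_peaks_max; infer_instance

-- ===== CLAIM (what is proved, stated in full; the proofs are below) =====
def Claim_equal_get_peaks_max : Prop := ∀ (x : List Int) (y : List Int) (threshold : Int), Dom_get_peaks_max x y threshold → Pre_get_peaks_max x y threshold → Spec_get_peaks_max x y threshold (get_peaks_max x y threshold)

-- ===== LEMMAS AND PROOFS =====

-- ghost interval list: the closed above-threshold intervals from index b on, with pending start s
def pv_collect (t : Int) : List Int → Nat → Option Nat → List (Nat × Nat)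
  | [], _, _ => []
  | v :: rest, b, none => pv_collect t rest (b + 1) (if v > t then some b else none)
  | v :: rest, b, some sv =>
      if v < t then (sv, b) :: pv_collect t rest (b + 1) none
      else pv_collect t rest (b + 1) (some sv)

-- A's loop (with end = none at entry, as it always is between iterations) appends exactly
-- the mapped images of the ghost interval list.
lemma pv_loop_eq (x y : List Int) (t : Int) :
    ∀ (rest : List Int) (b : Nat) (px py : List Int) (s : Option Nat),
      get_peaks_max_loop x y t rest b px py s none =
        (px ++ (pv_collect t rest b s).map (fun p => x.getD (p.2 - (p.2 - p.1) / 2) 0),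
         py ++ (pv_collect t rest b s).map (fun p => pvMaxSlice y p.1 p.2)) := by
  intro rest
  induction rest with
  | nil => intro b px py s; simp [get_peaks_max_loop, pv_collect]
  | cons v rest ih =>
    intro b px py s
    cases s with
    | none =>
      by_cases hgt : v > t
      · by_cases hlt : v < t
        · omega
        · simp [get_peaks_max_loop, pv_collect, hgt, hlt, ih]
      · simp [get_peaks_max_loop, pv_collect, hgt, ih]
    | some sv =>
      by_cases hlt : v < t
      · simp [get_peaks_max_loop, pv_collect, hlt, ih]
      · simp [get_peaks_max_loop, pv_collect, hlt, ih]

-- every interval in the ghost list has s < e (and b ≤ e)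
lemma pv_collect_lt (t : Int) :
    ∀ (rest : List Int) (b : Nat) (s : Option Nat),
      (∀ sv, s = some sv → sv < b) →
      ∀ p ∈ pv_collect t rest b s, p.1 < p.2 := by
  intro rest
  induction rest with
  | nil => intro b s _ p hp; simp [pv_collect] at hp
  | cons v rest ih =>
    intro b s hs p hp
    cases s with
    | none =>
      simp only [pv_collect] at hp
      refine ih (b + 1) _ ?_ p hp
      intro z hz
      by_cases hv : v > t
      · simp [hv] at hz; omega
      · simp [hv] at hz
    | some sv =>
      have hsv : sv < b := hs sv rfl
      simp only [pv_collect] at hp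
      split at hp
      · rcases List.mem_cons.mp hp with h | h
        · subst h; exact hsv
        · exact ih (b + 1) none (by simp) p h
      · exact ih (b + 1) (some sv) (by intro z hz; cases hz; omega) p hp

-- drop i of y, exposed one element, for i < length
lemma pv_drop_cons (y : List Int) (i : Nat) (h : i < y.length) :
    y.drop i = y.getD i 0 :: y.drop (i + 1) := by
  rw [List.drop_eq_getElem_cons h]
  simp [List.getD, List.getElem?_eq_getElem h]

-- the inner loop: its exit index closes the pending interval in the ghost list, and its
-- running max folds the consumed segment
lemma pv_consume_spec (y : List Int) (t : Int) :
    ∀ (k i : Nat) (m : Int), i ≤ y.length → y.length - i ≤ k →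
    (pv_consume t (y.drop i) i m).1 ≤ y.length ∧
    ((pv_consume t (y.drop i) i m).1 < y.length →
        y.getD (pv_consume t (y.drop i) i m).1 0 < t) ∧
    i ≤ (pv_consume t (y.drop i) i m).1 ∧
    (∀ sv, pv_collect t (y.drop i) i (some sv) =
      if (pv_consume t (y.drop i) i m).1 < y.length then
        (sv, (pv_consume t (y.drop i) i m).1) ::
          pv_collect t (y.drop ((pv_consume t (y.drop i) i m).1 + 1))
            ((pv_consume t (y.drop i) i m).1 + 1) none
      else []) ∧
    (pv_consume t (y.drop i) i m).2 =
      ((y.drop i).take ((pv_consume t (y.drop i) i m).1 - i)).foldl max m := by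
  intro k
  induction k with
  | zero =>
    intro i m hi hk
    have hieq : i = y.length := by omega
    subst hieq
    simp [List.drop_length, pv_consume, pv_collect]
  | succ k ihk =>
    intro i m hi hk
    by_cases h : i < y.length
    · by_cases hge : y.getD i 0 ≥ t
      · have hunf : pv_consume t (y.drop i) i m =
            pv_consume t (y.drop (i + 1)) (i + 1) (if y.getD i 0 > m then y.getD i 0 else m) := by
          rw [pv_drop_cons y i h]
          simp only [pv_consume]
          rw [if_pos hge]
        obtain ⟨h1, h2, h3, h4, h5⟩ :=
          ihk (i + 1) (if y.getD i 0 > m then y.getD i 0 else m) (by omega) (by omega)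
        rw [hunf]
        refine ⟨h1, h2, by omega, ?_, ?_⟩
        · intro sv
          have hnlt : ¬ (y.getD i 0 < t) := by omega
          rw [pv_drop_cons y i h]
          simp only [pv_collect]
          rw [if_neg hnlt]
          exact h4 sv
        · rw [pv_drop_cons y i h]
          set e := (pv_consume t (y.drop (i + 1)) (i + 1) (if y.getD i 0 > m then y.getD i 0 else m)).1 with hedef
          have he : i + 1 ≤ e := h3
          have htake : (y.getD i 0 :: y.drop (i + 1)).take (e - i)
              = y.getD i 0 :: (y.drop (i + 1)).take (e - (i + 1)) := by
            have : e - i = (e - (i + 1)) + 1 := by omega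
            rw [this, List.take_succ_cons]
          rw [htake]
          simp only [List.foldl_cons]
          rw [h5]
          congr 1
          rcases lt_trichotomy (y.getD i 0) m with h' | h' | h' <;> simp [max_def] <;> omega
      · have hlt : y.getD i 0 < t := by omega
        have hunf : pv_consume t (y.drop i) i m = (i, m) := by
          rw [pv_drop_cons y i h]
          simp only [pv_consume]
          rw [if_neg hge]
        rw [hunf]
        refine ⟨by omega, fun _ => hlt, le_refl _, ?_, by simp⟩
        intro sv
        rw [pv_drop_cons y i h]
        simp only [pv_collect]
        rw [if_pos hlt, if_pos h]
    · have hieq : i = y.length := by omega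
      subst hieq
      simp [List.drop_length, pv_consume, pv_collect]

-- max(y[s:e]) is the running max of the segment, for s < e ≤ len y
lemma pvMaxSlice_eq (y : List Int) (s e : Nat) (hse : s < e) (he : e ≤ y.length) :
    pvMaxSlice y s e = ((y.drop (s + 1)).take (e - (s + 1))).foldl max (y.getD s 0) := by
  unfold pvMaxSlice
  rw [PySem.List.slice_natCast]
  rw [pv_drop_cons y s (by omega)]
  have : e - s = (e - (s + 1)) + 1 := by omega
  rw [this, List.take_succ_cons]
  rw [PySem.List.max?_id_cons]
  rfl

-- exit case of the outer loop
lemma pv_outer_zero_case (x y : List Int) (t : Int) (n i : Nat) (px py : List Int)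
    (h : ¬ i < n) : pv_outer x y t n i px py = (px, py) := by
  unfold pv_outer; exact dif_neg h

-- B's outer loop appends the mapped images of the same ghost interval list
lemma pv_outer_eq_aux (x y : List Int) (t : Int) :
    ∀ (k i : Nat) (px py : List Int), i ≤ y.length → y.length - i ≤ k →
      pv_outer x y t y.length i px py =
        (px ++ (pv_collect t (y.drop i) i none).map (fun p => x.getD ((p.1 + p.2 + 1) / 2) 0),
         py ++ (pv_collect t (y.drop i) i none).map (fun p => pvMaxSlice y p.1 p.2)) := by
  intro k
  induction k with
  | zero =>
    intro i px py hi hk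
    have : i = y.length := by omega
    rw [pv_outer_zero_case]
    · subst this; simp [List.drop_length, pv_collect]
    · omega
  | succ k ihk =>
    intro i px py hi hk
    by_cases h : i < y.length
    · rw [pv_outer]
      rw [dif_pos h]
      by_cases hgt : y.getD i 0 > t
      · rw [if_pos hgt]
        obtain ⟨h1, h2, h3, h4, h5⟩ := pv_consume_spec y t y.length (i + 1) (y.getD i 0) (by omega) (by omega)
        set e := (pv_consume t (y.drop (i + 1)) (i + 1) (y.getD i 0)).1 with hedef
        have hcol : pv_collect t (y.drop i) i none =
            if e < y.length then (i, e) :: pv_collect t (y.drop (e + 1)) (e + 1) none else [] := by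
          rw [pv_drop_cons y i h]
          simp only [pv_collect, if_pos hgt]
          exact h4 i
        by_cases hclose : e < y.length
        · rw [if_pos hclose]
          rw [ihk e (px ++ [x.getD ((i + e + 1) / 2) 0])
            (py ++ [(pv_consume t (y.drop (i + 1)) (i + 1) (y.getD i 0)).2]) (by omega) (by omega)]
          have hstep : pv_collect t (y.drop e) e none = pv_collect t (y.drop (e + 1)) (e + 1) none := by
            have hne : ¬ (t < (y[e]?).getD 0) := by
              have := h2 hclose; simp only [List.getD] at this; omega
            rw [pv_drop_cons y e hclose]
            simp [pv_collect, hne]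
          rw [hstep, hcol, if_pos hclose]
          simp only [List.getD] at h5
          simp [h5, pvMaxSlice_eq y i e (by omega) (by omega), List.getD]
        · rw [if_neg hclose, hcol, if_neg hclose]
          simp
      · rw [if_neg hgt]
        rw [ihk (i + 1) px py (by omega) (by omega)]
        have hstep : pv_collect t (y.drop i) i none = pv_collect t (y.drop (i + 1)) (i + 1) none := by
          have hgt' : ¬ (t < (y[i]?).getD 0) := by simpa [List.getD] using hgt
          rw [pv_drop_cons y i h]
          simp [pv_collect, hgt']
        rw [hstep]
    · have : i = y.length := by omega
      rw [pv_outer_zero_case _ _ _ _ _ _ _ (by omega)]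
      subst this
      simp [List.drop_length, pv_collect]

-- ===== VERDICT (by name: the statement is the Claim_ definition above) =====
theorem get_peaks_max_spec : Claim_equal_get_peaks_max := by
  intro x y t _ _
  unfold Spec_get_peaks_max get_peaks_max get_peaks_max_alt
  rw [pv_loop_eq, pv_outer_eq_aux x y t y.length 0 [] [] (by omega) (by omega)]
  simp only [List.drop_zero, List.nil_append]
  have hlt := pv_collect_lt t y 0 none (by simp)
  simp only [Prod.mk.injEq]
  refine ⟨?_, trivial⟩
  apply List.map_congr_left
  intro p hp
  have := hlt p hp
  congr 1
  omega
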